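-- pv_equiv track=rewrite | github.com/Sick-N/E-Sports-Tournament-Matchmaker | Team Creation.py | create_snake_draft_teams
-- ===== SOURCE A (Python) =====
-- def create_snake_draft_teams(players, team_size):
--     """Create balanced teams using snake draft algorithm."""
--     sorted_players = sorted(players, key=lambda x: x['elo'], reverse=True)
--
--     num_teams = len(players) // team_size
--     teams = [[] for _ in range(num_teams)]
--
--     for i, player in enumerate(sorted_players[:num_teams * team_size]):
--         round_num = i // num_teams
--         if round_num % 2 == 0:
--             team_idx = i % num_teams
--         else:
--             team_idx = num_teams - 1 - (i % num_teams)
--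
--         teams[team_idx].append(player)
--
--     remaining = sorted_players[num_teams * team_size:]
--     return teams, remaining
-- ===== SOURCE B (Python) =====
-- def create_snake_draft_teams(players, team_size):
--     """Create balanced teams using snake draft algorithm.
--
--     Gather formulation: team t's round-r pick sits at a closed-form index of the
--     sorted list (r*num_teams + t on even rounds, reflected on odd rounds), so each
--     team is built directly by a comprehension instead of scattering players with a
--     flat enumerate/modulo loop."""
--     sorted_players = sorted(players, key=lambda x: x['elo'], reverse=True)
--     num_teams = len(players) // team_size
--     teams = [
--         [sorted_players[r * num_teams + (t if r % 2 == 0 else num_teams - 1 - t)]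
--          for r in range(team_size)]
--         for t in range(num_teams)
--     ]
--     return teams, sorted_players[num_teams * team_size:]
-- ===== Notes on version B (the rewrite author's own statement) =====
-- stated objective: simpler
-- what changed: B gathers each team directly via a closed-form index into the sorted list (nested team/round comprehension) instead of A's flat enumerate loop that scatters players with floor-division/modulo round arithmetic and in-place appends.
import Mathlib
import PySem

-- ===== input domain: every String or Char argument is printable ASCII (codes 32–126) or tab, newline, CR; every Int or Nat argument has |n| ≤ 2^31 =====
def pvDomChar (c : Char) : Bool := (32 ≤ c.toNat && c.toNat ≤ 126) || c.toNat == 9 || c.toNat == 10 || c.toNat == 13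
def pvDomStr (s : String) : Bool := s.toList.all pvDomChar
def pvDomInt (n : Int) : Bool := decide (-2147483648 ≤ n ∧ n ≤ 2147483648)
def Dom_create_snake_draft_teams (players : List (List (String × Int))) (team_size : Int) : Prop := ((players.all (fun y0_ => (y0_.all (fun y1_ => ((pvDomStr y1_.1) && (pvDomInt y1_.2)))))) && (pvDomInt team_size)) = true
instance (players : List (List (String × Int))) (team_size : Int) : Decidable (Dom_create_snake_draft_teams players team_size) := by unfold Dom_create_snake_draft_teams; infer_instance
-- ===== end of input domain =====

-- B builds each team by a closed-form gather index into the sorted list instead of A's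
-- flat enumerate/scatter loop; equivalence of the RETURN values is proved on Pre_.


-- ===== PORT A =====
-- shared key of the identical 'sorted(..., key=lambda x: x['elo'], reverse=True)' call:
-- x['elo'] as first-match lookup; the default 0 is never used under Pre_ (key present).
def pvElo (x : List (String × Int)) : Int := ((PySem.Dict.mk x).get? "elo").getD 0

-- the 'for i, player in enumerate(...)' loop of A, scattering into teams by index
def pvDraftLoop (num_teams : Int) :
    List (Int × List (String × Int)) → List (List (List (String × Int))) → List (List (List (String × Int)))
  | [], teams => teams
  | (i, player) :: rest, teams =>
      let round_num := PySem.Int.floordiv i num_teams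
      let team_idx := if PySem.Int.mod round_num 2 = 0 then PySem.Int.mod i num_teams
                      else num_teams - 1 - PySem.Int.mod i num_teams
      pvDraftLoop num_teams rest
        (teams.set team_idx.toNat ((teams.getD team_idx.toNat []) ++ [player]))

def create_snake_draft_teams (players : List (List (String × Int))) (team_size : Int) : (List (List (List (String × Int)))) × (List (List (String × Int))) :=
  let sorted_players := PySem.List.sorted players pvElo true
  let num_teams := PySem.Int.floordiv (players.length : Int) team_size
  let teams : List (List (List (String × Int))) := List.replicate num_teams.toNat []
  let drafted := PySem.List.slice sorted_players none (some (num_teams * team_size))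
  let teams := pvDraftLoop num_teams (PySem.List.enumerate drafted 0) teams
  let remaining := PySem.List.slice sorted_players (some (num_teams * team_size)) none
  (teams, remaining)

-- ===== PORT B =====
def create_snake_draft_teams_alt (players : List (List (String × Int))) (team_size : Int) : (List (List (List (String × Int)))) × (List (List (String × Int))) :=
  let sorted_players := PySem.List.sorted players pvElo true
  let num_teams := PySem.Int.floordiv (players.length : Int) team_size
  let teams := (PySem.List.pyRange 0 num_teams 1).map (fun t =>
    (PySem.List.pyRange 0 team_size 1).map (fun r =>
      PySem.List.pyGetD sorted_players
        (r * num_teams + (if PySem.Int.mod r 2 = 0 then t else num_teams - 1 - t)) []))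
  (teams, PySem.List.slice sorted_players (some (num_teams * team_size)) none)

-- ===== PRECONDITION & SPEC =====
-- Pre_ excludes exactly the inputs where A raises: team_size = 0 (ZeroDivisionError),
-- team_size < 0 with nonempty players (IndexError), and a player missing the 'elo' key
-- (KeyError in the sort).
def Pre_create_snake_draft_teams (players : List (List (String × Int))) (team_size : Int) : Prop :=
  team_size ≠ 0 ∧ (players = [] ∨ 0 < team_size) ∧
    ∀ x ∈ players, ((PySem.Dict.mk x).get? "elo").isSome = true
instance (players : List (List (String × Int))) (team_size : Int) : Decidable (Pre_create_snake_draft_teams players team_size) := by unfold Pre_create_snake_draft_teams; infer_instance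

def pvWitness_create_snake_draft_teams : (List (List (String × Int))) × Int :=
  ([[("elo", 3)], [("elo", 1)], [("elo", 2)], [("elo", 5)]], 2)

def Spec_create_snake_draft_teams (players : List (List (String × Int))) (team_size : Int) (out : (List (List (List (String × Int)))) × (List (List (String × Int)))) : Prop := out = create_snake_draft_teams_alt players team_size
instance (players : List (List (String × Int))) (team_size : Int) (out : (List (List (List (String × Int)))) × (List (List (String × Int)))) : Decidable (Spec_create_snake_draft_teams players team_size out) := by unfold Spec_create_snake_draft_teams; infer_instance

-- ===== CLAIM (what is proved, stated in full; the proofs are below) =====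
def Claim_equal_create_snake_draft_teams : Prop := ∀ (players : List (List (String × Int))) (team_size : Int), Dom_create_snake_draft_teams players team_size → Pre_create_snake_draft_teams players team_size → Spec_create_snake_draft_teams players team_size (create_snake_draft_teams players team_size)

-- ===== LEMMAS AND PROOFS =====

-- the closed-form position (in the descending sorted list) of team t's round-r pick
def pvIdx (N r t : Nat) : Nat := r * N + (if r % 2 = 0 then t else N - 1 - t)

theorem pvIdx_lt (N T q t : Nat) (hq : q < T) (ht : t < N) : pvIdx N q t < N * T := by
  have h1 : (q + 1) * N ≤ T * N := Nat.mul_le_mul_right _ (by omega)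
  have : pvIdx N q t < (q + 1) * N := by
    unfold pvIdx; split <;> simp [Nat.succ_mul] <;> omega
  calc pvIdx N q t < (q + 1) * N := this
    _ ≤ T * N := h1
    _ = N * T := Nat.mul_comm _ _

theorem pvDraftLoop_append (nt : Int) (l1 l2 : List (Int × List (String × Int)))
    (teams : List (List (List (String × Int)))) :
    pvDraftLoop nt (l1 ++ l2) teams = pvDraftLoop nt l2 (pvDraftLoop nt l1 teams) := by
  induction l1 generalizing teams with
  | nil => rfl
  | cons p rest ih => cases p; simp [pvDraftLoop, ih]

theorem pvSet_map_range {β : Type} (g : Nat → β) (N k : Nat) (v : β) (hk : k < N) :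
    ((List.range N).map g).set k v = (List.range N).map (fun t => if t = k then v else g t) := by
  apply List.ext_getElem
  · simp
  · intro i h1 h2
    simp only [List.getElem_set, List.getElem_map, List.getElem_range]
    by_cases hik : i = k
    · subst hik; simp
    · rw [if_neg (fun h => hik h.symm), if_neg hik]

theorem pvIdx_arith (N r c : Nat) (hN : 0 < N) (hc : c < N) :
    PySem.Int.floordiv ((r * N + c : Nat) : Int) (N : Int) = (r : Int) ∧
    PySem.Int.mod ((r * N + c : Nat) : Int) (N : Int) = (c : Int) := by
  constructor
  · rw [PySem.Int.floordiv_natCast]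
    congr 1
    rw [Nat.mul_comm r N, Nat.mul_add_div hN, Nat.div_eq_of_lt hc]
    omega
  · rw [PySem.Int.mod_natCast]
    congr 1
    rw [Nat.mul_comm r N, Nat.mul_add_mod, Nat.mod_eq_of_lt hc]

theorem pvStep (N r c : Nat) (hN : 0 < N) (hc : c < N) (p : List (String × Int))
    (rest : List (Int × List (String × Int))) (teams : List (List (List (String × Int)))) :
    pvDraftLoop (N : Int) ((((r * N + c : Nat) : Int), p) :: rest) teams
    = pvDraftLoop (N : Int) rest
        (teams.set (if r % 2 = 0 then c else N - 1 - c)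
          ((teams.getD (if r % 2 = 0 then c else N - 1 - c) []) ++ [p])) := by
  obtain ⟨hfd, hmd⟩ := pvIdx_arith N r c hN hc
  have hm2 : PySem.Int.mod (r : Int) 2 = ((r % 2 : Nat) : Int) := by
    exact_mod_cast PySem.Int.mod_natCast r 2
  simp only [pvDraftLoop, hfd, hmd, hm2]
  by_cases hr : r % 2 = 0
  · simp [hr]
  · have h2 : ¬ ((↑(r % 2) : Int) = 0) := by exact_mod_cast hr
    rw [if_neg h2, if_neg hr]
    have htn : ((N : Int) - 1 - (c : Int)).toNat = N - 1 - c := by omega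
    rw [htn]

theorem pvRound_aux (dr : List (List (String × Int))) (N r : Nat) (hN : 0 < N)
    (hlen : r * N + N ≤ dr.length) (g : Nat → List (List (String × Int))) :
    ∀ c, c ≤ N →
    pvDraftLoop (N : Int)
      (PySem.List.enumerate ((dr.drop (r * N + c)).take (N - c)) ((r * N + c : Nat) : Int))
      ((List.range N).map (fun t =>
        g t ++ (if (if r % 2 = 0 then t < c else N - c ≤ t) then [dr.getD (pvIdx N r t) []] else [])))
    = (List.range N).map (fun t => g t ++ [dr.getD (pvIdx N r t) []]) := by
  suffices H : ∀ d c, c ≤ N → N - c = d →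
      pvDraftLoop (N : Int)
        (PySem.List.enumerate ((dr.drop (r * N + c)).take (N - c)) ((r * N + c : Nat) : Int))
        ((List.range N).map (fun t =>
          g t ++ (if (if r % 2 = 0 then t < c else N - c ≤ t) then [dr.getD (pvIdx N r t) []] else [])))
      = (List.range N).map (fun t => g t ++ [dr.getD (pvIdx N r t) []]) by
    intro c hc; exact H (N - c) c hc rfl
  intro d
  induction d with
  | zero =>
    intro c hc h0
    have hcN : c = N := by omega
    rw [hcN]
    simp only [Nat.sub_self, List.take_zero, PySem.List.enumerate_nil, pvDraftLoop]
    apply List.map_congr_left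
    intro t ht
    rw [List.mem_range] at ht
    have hcond : (if r % 2 = 0 then t < N else 0 ≤ t) := by split <;> omega
    rw [if_pos hcond]
  | succ d ih =>
    intro c hc h0
    have hcN : c < N := by omega
    have hidx : r * N + c < dr.length := by omega
    have htake : (dr.drop (r * N + c)).take (N - c)
        = dr[r * N + c] :: ((dr.drop (r * N + (c + 1))).take (N - (c + 1))) := by
      rw [List.drop_eq_getElem_cons hidx, h0]
      have hd : N - (c + 1) = d := by omega
      rw [hd, List.take_succ_cons, ← Nat.add_assoc]
    rw [htake, PySem.List.enumerate_cons, pvStep N r c hN hcN]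
    have hset : ((List.range N).map (fun t =>
          g t ++ (if (if r % 2 = 0 then t < c else N - c ≤ t) then [dr.getD (pvIdx N r t) []] else []))).set
          (if r % 2 = 0 then c else N - 1 - c)
          ((((List.range N).map (fun t =>
            g t ++ (if (if r % 2 = 0 then t < c else N - c ≤ t) then [dr.getD (pvIdx N r t) []] else []))).getD
            (if r % 2 = 0 then c else N - 1 - c) []) ++ [dr[r * N + c]])
        = (List.range N).map (fun t =>
          g t ++ (if (if r % 2 = 0 then t < c + 1 else N - (c + 1) ≤ t) then [dr.getD (pvIdx N r t) []] else [])) := by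
      have hklt : (if r % 2 = 0 then c else N - 1 - c) < N := by split <;> omega
      rw [PySem.List.getD_map_range _ N _ [] hklt, pvSet_map_range _ N _ _ hklt]
      apply List.map_congr_left
      intro t ht
      rw [List.mem_range] at ht
      by_cases hteq : t = (if r % 2 = 0 then c else N - 1 - c)
      · subst hteq
        have hcold : ¬ (if r % 2 = 0 then (if r % 2 = 0 then c else N - 1 - c) < c
            else N - c ≤ (if r % 2 = 0 then c else N - 1 - c)) := by
          by_cases hr : r % 2 = 0
          · rw [if_pos hr, if_pos hr]; omega
          · rw [if_neg hr, if_neg hr]; omega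
        have hcnew : (if r % 2 = 0 then (if r % 2 = 0 then c else N - 1 - c) < c + 1
            else N - (c + 1) ≤ (if r % 2 = 0 then c else N - 1 - c)) := by
          by_cases hr : r % 2 = 0
          · rw [if_pos hr, if_pos hr]; omega
          · rw [if_neg hr, if_neg hr]; omega
        have hpv : pvIdx N r (if r % 2 = 0 then c else N - 1 - c) = r * N + c := by
          unfold pvIdx
          by_cases hr : r % 2 = 0
          · rw [if_pos hr, if_pos hr]
          · rw [if_neg hr, if_neg hr]; omega
        rw [if_pos rfl, if_neg hcold, if_pos hcnew, List.append_nil, hpv,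
            List.getD_eq_getElem dr [] hidx]
      · rw [if_neg hteq]
        have hiff : (if r % 2 = 0 then t < c else N - c ≤ t) ↔ (if r % 2 = 0 then t < c + 1 else N - (c + 1) ≤ t) := by
          by_cases hr : r % 2 = 0
          · rw [if_pos hr, if_pos hr]
            rw [if_pos hr] at hteq
            omega
          · rw [if_neg hr, if_neg hr]
            rw [if_neg hr] at hteq
            omega
        by_cases hcold : (if r % 2 = 0 then t < c else N - c ≤ t)
        · rw [if_pos hcold, if_pos (hiff.mp hcold)]
        · rw [if_neg hcold, if_neg (fun hn => hcold (hiff.mpr hn))]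
    rw [hset]
    have hoff : ((r * N + c : Nat) : Int) + 1 = ((r * N + (c + 1) : Nat) : Int) := by push_cast; ring
    rw [hoff]
    exact ih (c + 1) (by omega) (by omega)

theorem pvRound (dr : List (List (String × Int))) (N r : Nat) (hN : 0 < N)
    (hlen : r * N + N ≤ dr.length) (g : Nat → List (List (String × Int))) :
    pvDraftLoop (N : Int)
      (PySem.List.enumerate ((dr.drop (r * N)).take N) ((r * N : Nat) : Int))
      ((List.range N).map g)
    = (List.range N).map (fun t => g t ++ [dr.getD (pvIdx N r t) []]) := by
  have h := pvRound_aux dr N r hN hlen g 0 (Nat.zero_le N)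
  have h0 : ((List.range N).map (fun t =>
      g t ++ (if (if r % 2 = 0 then t < 0 else N - 0 ≤ t) then [dr.getD (pvIdx N r t) []] else [])))
      = (List.range N).map g := by
    apply List.map_congr_left
    intro t ht
    rw [List.mem_range] at ht
    have hcond : ¬ (if r % 2 = 0 then t < 0 else N - 0 ≤ t) := by
      split <;> omega
    rw [if_neg hcond, List.append_nil]
  rw [h0] at h
  simpa using h

theorem pvRounds (dr : List (List (String × Int))) (N T : Nat) (hN : 0 < N)
    (hlen : dr.length = N * T) :
    ∀ r, r ≤ T →
    pvDraftLoop (N : Int)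
      (PySem.List.enumerate (dr.drop (r * N)) ((r * N : Nat) : Int))
      ((List.range N).map (fun t => (List.range r).map (fun q => dr.getD (pvIdx N q t) [])))
    = (List.range N).map (fun t => (List.range T).map (fun q => dr.getD (pvIdx N q t) [])) := by
  suffices H : ∀ e r, r ≤ T → T - r = e →
      pvDraftLoop (N : Int)
        (PySem.List.enumerate (dr.drop (r * N)) ((r * N : Nat) : Int))
        ((List.range N).map (fun t => (List.range r).map (fun q => dr.getD (pvIdx N q t) [])))
      = (List.range N).map (fun t => (List.range T).map (fun q => dr.getD (pvIdx N q t) [])) by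
    intro r hr; exact H (T - r) r hr rfl
  intro e
  induction e with
  | zero =>
    intro r hr h0
    have hrT : r = T := by omega
    rw [hrT]
    have hdrop : dr.drop (T * N) = [] := by
      apply List.drop_eq_nil_of_le
      rw [hlen, Nat.mul_comm]
    rw [hdrop]
    simp [PySem.List.enumerate_nil, pvDraftLoop]
  | succ e ih =>
    intro r hr h0
    have hrT : r < T := by omega
    have hsm : (r + 1) * N = r * N + N := Nat.succ_mul r N
    have hle : (r + 1) * N ≤ T * N := Nat.mul_le_mul_right _ (by omega)
    have hcm : N * T = T * N := Nat.mul_comm N T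
    have hlen2 : r * N + N ≤ dr.length := by omega
    have hsplit : dr.drop (r * N) = ((dr.drop (r * N)).take N) ++ dr.drop (r * N + N) := by
      have hdd : dr.drop (r * N + N) = (dr.drop (r * N)).drop N := by
        rw [List.drop_drop, Nat.add_comm]
      rw [hdd, List.take_append_drop]
    rw [hsplit, PySem.List.enumerate_append, pvDraftLoop_append]
    have hlen1 : ((dr.drop (r * N)).take N).length = N := by
      rw [List.length_take, List.length_drop]
      omega
    rw [hlen1, pvRound dr N r hN hlen2]
    have hmapeq : (List.range N).map (fun t =>
          ((List.range r).map (fun q => dr.getD (pvIdx N q t) [])) ++ [dr.getD (pvIdx N r t) []])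
        = (List.range N).map (fun t => (List.range (r + 1)).map (fun q => dr.getD (pvIdx N q t) [])) := by
      apply List.map_congr_left
      intro t _
      rw [List.range_succ, List.map_append, List.map_cons, List.map_nil]
    rw [hmapeq]
    have hoff : ((r * N : Nat) : Int) + (N : Int) = (((r + 1) * N : Nat) : Int) := by
      push_cast; ring
    rw [hoff, show r * N + N = (r + 1) * N from (Nat.succ_mul r N).symm]
    exact ih (r + 1) (by omega) (by omega)

theorem pvA_teams (S : List (List (String × Int))) (N T : Nat) (hlen : N * T ≤ S.length) :
    pvDraftLoop (N : Int)
      (PySem.List.enumerate (S.take (N * T)) 0)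
      (List.replicate N [])
    = (List.range N).map (fun t => (List.range T).map (fun q => S.getD (pvIdx N q t) [])) := by
  rcases Nat.eq_zero_or_pos N with hN0 | hN
  · subst hN0
    simp [pvDraftLoop, PySem.List.enumerate_nil]
  · have hlen' : (S.take (N * T)).length = N * T := by
      rw [List.length_take]; omega
    have h := pvRounds (S.take (N * T)) N T hN hlen' 0 (Nat.zero_le T)
    simp only [Nat.zero_mul, List.drop_zero, List.range_zero, List.map_nil, Nat.cast_zero] at h
    have hrep : (List.range N).map (fun _ => ([] : List (List (String × Int)))) = List.replicate N [] := by
      rw [List.map_const', List.length_range]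
    rw [hrep] at h
    rw [h]
    apply List.map_congr_left
    intro t ht
    rw [List.mem_range] at ht
    apply List.map_congr_left
    intro q hq
    rw [List.mem_range] at hq
    have hlt := pvIdx_lt N T q t hq ht
    rw [List.getD_eq_getElem?_getD, List.getD_eq_getElem?_getD, List.getElem?_take, if_pos hlt]

theorem pvB_teams (S : List (List (String × Int))) (N T : Nat) :
    (PySem.List.pyRange 0 (N : Int) 1).map (fun t =>
      (PySem.List.pyRange 0 (T : Int) 1).map (fun r =>
        PySem.List.pyGetD S (r * (N : Int) + (if PySem.Int.mod r 2 = 0 then t else (N : Int) - 1 - t)) []))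
    = (List.range N).map (fun t => (List.range T).map (fun q => S.getD (pvIdx N q t) [])) := by
  rw [PySem.List.pyRange_zero_nat N, List.map_map]
  apply List.map_congr_left
  intro a ha
  rw [List.mem_range] at ha
  simp only [Function.comp]
  rw [PySem.List.pyRange_zero_nat T, List.map_map]
  apply List.map_congr_left
  intro q _
  simp only [Function.comp]
  have hm2 : PySem.Int.mod (q : Int) 2 = ((q % 2 : Nat) : Int) := by
    exact_mod_cast PySem.Int.mod_natCast q 2
  rw [hm2]
  by_cases hq2 : q % 2 = 0
  · rw [if_pos (by exact_mod_cast hq2)]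
    have hcast : (q : Int) * (N : Int) + (a : Int) = ((q * N + a : Nat) : Int) := by
      push_cast; ring
    rw [hcast, PySem.List.pyGetD_natCast]
    unfold pvIdx
    rw [if_pos hq2]
  · rw [if_neg (by exact_mod_cast hq2)]
    have h1 : ((N - 1 - a : Nat) : Int) = (N : Int) - 1 - (a : Int) := by omega
    have hcast : (q : Int) * (N : Int) + ((N : Int) - 1 - (a : Int)) = ((q * N + (N - 1 - a) : Nat) : Int) := by
      push_cast [h1]; ring
    rw [hcast, PySem.List.pyGetD_natCast]
    unfold pvIdx
    rw [if_neg hq2]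

-- ===== VERDICT (by name: the statement is the Claim_ definition above) =====
theorem pvFloordivZero (b : Int) (hb : b ≠ 0) : PySem.Int.floordiv 0 b = 0 := by
  have hm : PySem.Int.mod 0 b = 0 := (PySem.Int.mod_eq_zero_iff_dvd 0 b).mpr (dvd_zero b)
  have h := PySem.Int.floordiv_mul_add_mod 0 b
  rw [hm, add_zero] at h
  rcases mul_eq_zero.mp h with h0 | h0
  · exact h0
  · exact absurd h0 hb

theorem create_snake_draft_teams_spec : Claim_equal_create_snake_draft_teams := by
  intro players team_size _ hPre
  obtain ⟨hts0, hcase, -⟩ := hPre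
  rcases hcase with hnil | hts
  · -- players = [] : both sides compute ([], [])
    subst hnil
    unfold Spec_create_snake_draft_teams create_snake_draft_teams create_snake_draft_teams_alt
    have hS : PySem.List.sorted ([] : List (List (String × Int))) pvElo true = [] :=
      (PySem.List.sorted_eq_nil_iff _ _ _).mpr rfl
    have hfd0 : PySem.Int.floordiv 0 team_size = 0 := pvFloordivZero team_size hts0
    simp [hS, hfd0, pvDraftLoop, PySem.List.enumerate_nil, PySem.List.slice,
      PySem.List.pyRange_one_eq_nil (le_refl (0 : Int))]
  unfold Spec_create_snake_draft_teams create_snake_draft_teams create_snake_draft_teams_alt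
  have hT : team_size = ((team_size.toNat : Nat) : Int) := by omega
  set T := team_size.toNat with hTdef
  rw [hT]
  set S := PySem.List.sorted players pvElo true with hS
  set N := players.length / T with hNdef
  have hnum : PySem.Int.floordiv ((players.length : Nat) : Int) ((T : Nat) : Int) = ((N : Nat) : Int) :=
    PySem.Int.floordiv_natCast players.length T
  simp only [hnum]
  have hprod : ((N : Nat) : Int) * ((T : Nat) : Int) = ((N * T : Nat) : Int) := by push_cast; ring
  rw [hprod, PySem.List.slice_to_natCast, PySem.List.slice_from_natCast, Int.toNat_natCast]
  have hSlen : S.length = players.length := PySem.List.length_sorted players pvElo true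
  have hlen : N * T ≤ S.length := by
    rw [hSlen, hNdef]
    exact Nat.div_mul_le_self _ _
  rw [Prod.mk.injEq]
  refine ⟨?_, rfl⟩
  rw [pvA_teams S N T hlen, ← pvB_teams S N T]
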